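-- pv_equiv track=rewrite | github.com/ewanritchie85/wordwheel-solver | src/solver.py | find_valid_words
-- ===== SOURCE A (Python) =====
-- from itertools import permutations, combinations
--
-- def find_valid_words(combos: list[tuple], dictionary: set[str]) -> set[str]:
--     """Finds all valid words from the provided combinations that exist in the dictionary.
--
--     Args:
--         combos (list[tuple]): output of find_valid_combos function
--         dictionary (set[str]): set of words from word_list.txt
--
--     Returns:
--         set[str]: a set of valid word matches from the dictionary
--     """
--     valid_words = set()
--     for combo in combos:
--         for perm in permutations(combo):
--             word = "".join(perm)
--             if word in dictionary:
--                 valid_words.add(word)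
--     return valid_words
-- ===== SOURCE B (Python) =====
-- def find_valid_words(combos, dictionary):
--     """Prefix-pruned depth-first search: precompute the set of all prefixes of
--     dictionary words once, then build permutations piece by piece, abandoning
--     any branch whose partial word is not a prefix of any dictionary word."""
--     prefixes = set()
--     for w in dictionary:
--         for i in range(len(w) + 1):
--             prefixes.add(w[:i])
--     valid_words = set()
--     for combo in combos:
--         _dfs("", list(combo), dictionary, prefixes, valid_words)
--     return valid_words
--
--
-- def _dfs(prefix, pieces, dictionary, prefixes, valid_words):
--     if prefix not in prefixes:
--         return
--     if not pieces:
--         if prefix in dictionary: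
--             valid_words.add(prefix)
--         return
--     for i in range(len(pieces)):
--         _dfs(prefix + pieces[i], pieces[:i] + pieces[i + 1:], dictionary,
--              prefixes, valid_words)
-- ===== Notes on version B (the rewrite author's own statement) =====
-- stated objective: faster
-- what changed: Replaces blind enumeration of all k! permutations of every combo with a prefix-pruned depth-first search over the combo pieces, using a precomputed set of all prefixes of dictionary words to abandon branches that cannot extend to any dictionary word.
import Mathlib
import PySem

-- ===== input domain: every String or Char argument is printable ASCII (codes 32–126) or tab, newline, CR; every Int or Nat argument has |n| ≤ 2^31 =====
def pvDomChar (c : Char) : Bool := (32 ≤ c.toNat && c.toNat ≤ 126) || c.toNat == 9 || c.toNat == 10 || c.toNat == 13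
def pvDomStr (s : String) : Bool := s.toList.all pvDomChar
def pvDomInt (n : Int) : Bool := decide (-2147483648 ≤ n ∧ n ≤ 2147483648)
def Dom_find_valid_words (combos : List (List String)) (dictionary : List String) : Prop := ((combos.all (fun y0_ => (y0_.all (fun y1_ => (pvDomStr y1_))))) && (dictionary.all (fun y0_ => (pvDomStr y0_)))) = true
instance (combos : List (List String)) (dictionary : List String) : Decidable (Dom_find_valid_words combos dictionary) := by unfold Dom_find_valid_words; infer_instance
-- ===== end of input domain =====

-- ===== PORT A =====
-- A: for each combo, try every permutation of its pieces and keep the joined words found in the dictionary.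
def find_valid_words (combos : List (List String)) (dictionary : List String) : List String :=
  combos.foldl
    (fun valid_words combo =>
      (PySem.List.permutations combo combo.length).foldl
        (fun valid_words perm =>
          let word := PySem.Str.join "" perm
          if PySem.Set.contains dictionary word then PySem.Set.add valid_words word
          else valid_words)
        valid_words)
    PySem.Set.empty

-- ===== PORT B =====
-- B: precompute the set of all prefixes of dictionary words, then a depth-first search over the
-- combo pieces that abandons any branch whose partial word is not a prefix of a dictionary word.
def pvPrefixes (dictionary : List String) : PySem.Set String :=
  dictionary.foldl
    (fun prefixes w =>
      (PySem.List.pyRange 0 (PySem.Str.len w + 1) 1).foldl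
        (fun prefixes i => PySem.Set.add prefixes (PySem.Str.slice w none (some i)))
        prefixes)
    PySem.Set.empty

def pvDfs (dictionary prefixes : List String) (pre : String) (pieces : List String)
    (valid_words : PySem.Set String) : PySem.Set String :=
  if PySem.Set.contains prefixes pre = false then valid_words
  else if pieces.isEmpty then
    (if PySem.Set.contains dictionary pre then PySem.Set.add valid_words pre else valid_words)
  else
    (List.range pieces.length).foldl
      (fun valid_words i =>
        match h : pieces[i]? with
        | none => valid_words
        | some p => pvDfs dictionary prefixes (pre ++ p) (pieces.eraseIdx i) valid_words)
      valid_words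
termination_by pieces.length
decreasing_by
  have hi : i < pieces.length := by
    exact (List.getElem?_eq_some_iff.mp h).1
  simp [List.length_eraseIdx, hi]
  omega

def find_valid_words_alt (combos : List (List String)) (dictionary : List String) : List String :=
  let prefixes := pvPrefixes dictionary
  combos.foldl (fun valid_words combo => pvDfs dictionary prefixes "" combo valid_words)
    PySem.Set.empty

-- ===== PRECONDITION & SPEC =====
def Spec_find_valid_words (combos : List (List String)) (dictionary : List String) (out : List String) : Prop := out = find_valid_words_alt combos dictionary
instance (combos : List (List String)) (dictionary : List String) (out : List String) : Decidable (Spec_find_valid_words combos dictionary out) := by unfold Spec_find_valid_words; infer_instance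

-- ===== CLAIM (what is proved, stated in full; the proofs are below) =====
def Claim_equal_find_valid_words : Prop := ∀ (combos : List (List String)) (dictionary : List String), Dom_find_valid_words combos dictionary → Spec_find_valid_words combos dictionary (find_valid_words combos dictionary)

-- ===== LEMMAS AND PROOFS =====

theorem pv_contains_iff (s : List String) (x : String) :
    PySem.Set.contains s x = true ↔ x ∈ s := by
  simp [PySem.Set.contains]

theorem pv_join_nil : PySem.Str.join "" ([] : List String) = "" := by
  simp [PySem.Str.join, PySem.Chars.join, List.intercalate]

theorem pv_flatten_intersperse_nil (l : List (List Char)) :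
    (List.intersperse ([] : List Char) l).flatten = l.flatten := by
  induction l with
  | nil => simp
  | cons a l ih => cases l <;> simp_all [List.intersperse]

theorem pv_join_cons (s : String) (l : List String) :
    PySem.Str.join "" (s :: l) = s ++ PySem.Str.join "" l := by
  apply String.toList_inj.mp
  simp [PySem.Str.join, PySem.Chars.join, List.intercalate, pv_flatten_intersperse_nil,
    String.toList_append]

theorem pv_subset_foldl_add {alpha : Type} (f : alpha → String) (l : List alpha)
    (acc : PySem.Set String) (x : String) (hx : x ∈ acc) :
    x ∈ l.foldl (fun s j => PySem.Set.add s (f j)) acc := by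
  induction l generalizing acc with
  | nil => exact hx
  | cons a l ih => exact ih _ ((PySem.Set.mem_add acc (f a) x).mpr (Or.inl hx))

theorem pv_mem_foldl_add {alpha : Type} (f : alpha → String) (l : List alpha)
    (acc : PySem.Set String) (i : alpha) (hi : i ∈ l) :
    f i ∈ l.foldl (fun s j => PySem.Set.add s (f j)) acc := by
  induction l generalizing acc with
  | nil => cases hi
  | cons a l ih =>
    cases hi with
    | head => exact pv_subset_foldl_add f l _ _ ((PySem.Set.mem_add _ _ _).mpr (Or.inr rfl))
    | tail _ hi => exact ih _ hi

theorem pv_mono_outer (d : List String) (acc : PySem.Set String) (x : String) (hx : x ∈ acc) :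
    x ∈ d.foldl
      (fun prefixes w =>
        (PySem.List.pyRange 0 (PySem.Str.len w + 1) 1).foldl
          (fun prefixes i => PySem.Set.add prefixes (PySem.Str.slice w none (some i)))
          prefixes)
      acc := by
  induction d generalizing acc with
  | nil => exact hx
  | cons w d ih => exact ih _ (pv_subset_foldl_add _ _ _ _ hx)

theorem pv_slice_prefix (s t : String) :
    PySem.Str.slice (s ++ t) none (some ((s.toList.length : Nat) : Int)) = s := by
  apply String.toList_inj.mp
  have : (PySem.Str.slice (s ++ t) none (some ((s.toList.length : Nat) : Int))).toList
      = (s ++ t).toList.take s.toList.length := by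
    simp [PySem.Str.slice]
  rw [this, String.toList_append, List.take_left]

-- every prefix of a dictionary word is in pvPrefixes
theorem pv_mem_outer (d : List String) (s t : String) (h : (s ++ t) ∈ d)
    (acc : PySem.Set String) :
    s ∈ d.foldl
      (fun prefixes w =>
        (PySem.List.pyRange 0 (PySem.Str.len w + 1) 1).foldl
          (fun prefixes i => PySem.Set.add prefixes (PySem.Str.slice w none (some i)))
          prefixes)
      acc := by
  induction d generalizing acc with
  | nil => cases h
  | cons w d ih =>
    simp only [List.foldl_cons]
    cases h with
    | head =>
      -- w = s ++ t : s is added by the inner fold at index |s|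
      apply pv_mono_outer
      have hmem : ((s.toList.length : Nat) : Int) ∈ PySem.List.pyRange 0 (PySem.Str.len (s ++ t) + 1) 1 := by
        rw [PySem.List.mem_pyRange_one]
        refine ⟨by positivity, ?_⟩
        rw [PySem.Str.len_eq, String.toList_append]
        simp
      have := pv_mem_foldl_add
        (fun i => PySem.Str.slice (s ++ t) none (some i))
        (PySem.List.pyRange 0 (PySem.Str.len (s ++ t) + 1) 1)
        acc _ hmem
      simp only [pv_slice_prefix] at this
      exact this
    | tail _ h => exact ih h _

theorem pv_prefix_closure (d : List String) (s t : String) (h : (s ++ t) ∈ d) :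
    s ∈ pvPrefixes d := by
  unfold pvPrefixes
  exact pv_mem_outer d s t h _

theorem pv_foldl_skip (d : List String) (pre : String) (L : List (List String))
    (v : PySem.Set String)
    (hall : ∀ perm ∈ L, PySem.Set.contains d (pre ++ PySem.Str.join "" perm) = false) :
    L.foldl
      (fun v perm =>
        let w := pre ++ PySem.Str.join "" perm
        if PySem.Set.contains d w then PySem.Set.add v w else v)
      v = v := by
  induction L generalizing v with
  | nil => rfl
  | cons a L ih =>
    simp only [List.foldl_cons]
    rw [hall a (by simp)]
    · exact ih v (fun p hp => hall p (by simp [hp]))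

theorem pv_permutations_succ (pieces : List String) (m : Nat) :
    PySem.List.permutations pieces (m + 1)
      = (List.range pieces.length).flatMap
          (fun i =>
            match pieces[i]? with
            | none => []
            | some x => List.map (fun p => x :: p) (PySem.List.permutations (pieces.eraseIdx i) m)) := by
  rw [PySem.List.permutations]
  congr 1
  funext i
  cases pieces[i]? <;> rfl

-- main invariant: the pruned DFS computes exactly A's fold over all permutations
theorem pv_dfs_eq (d : List String) (n : Nat) :
    ∀ (pieces : List String), pieces.length = n → ∀ (pre : String) (v : PySem.Set String),
    pvDfs d (pvPrefixes d) pre pieces v =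
      (PySem.List.permutations pieces n).foldl
        (fun v perm =>
          let w := pre ++ PySem.Str.join "" perm
          if PySem.Set.contains d w then PySem.Set.add v w else v)
        v := by
  induction n with
  | zero =>
    intro pieces hlen pre v
    have hp : pieces = [] := List.eq_nil_of_length_eq_zero hlen
    subst hp
    rw [pvDfs]
    by_cases hpre : PySem.Set.contains (pvPrefixes d) pre = false
    · rw [if_pos hpre]
      rw [show PySem.List.permutations ([] : List String) 0 = [[]] from rfl]
      simp only [List.foldl_cons, List.foldl_nil, pv_join_nil, String.append_empty]
      have : PySem.Set.contains d pre = false := by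
        by_contra hcon
        have : pre ∈ d := (pv_contains_iff d pre).mp (by revert hcon; cases PySem.Set.contains d pre <;> simp)
        have : pre ∈ pvPrefixes d := pv_prefix_closure d pre "" (by rwa [String.append_empty])
        rw [(pv_contains_iff _ _).mpr this] at hpre
        cases hpre
      rw [this]
      simp
    · rw [if_neg hpre]
      simp only [List.isEmpty_nil, if_pos]
      rw [show PySem.List.permutations ([] : List String) 0 = [[]] from rfl]
      simp only [List.foldl_cons, List.foldl_nil, pv_join_nil, String.append_empty]
  | succ m ih =>
    intro pieces hlen pre v
    rw [pvDfs]
    have hne : pieces ≠ [] := by intro h; subst h; simp at hlen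
    by_cases hpre : PySem.Set.contains (pvPrefixes d) pre = false
    · rw [if_pos hpre]
      refine (pv_foldl_skip d pre _ v ?_).symm
      intro perm _
      by_contra hcon
      have hmem : (pre ++ PySem.Str.join "" perm) ∈ d :=
        (pv_contains_iff _ _).mp (by revert hcon; cases PySem.Set.contains d (pre ++ PySem.Str.join "" perm) <;> simp)
      have : pre ∈ pvPrefixes d := pv_prefix_closure d pre _ hmem
      rw [(pv_contains_iff _ _).mpr this] at hpre
      cases hpre
    · rw [if_neg hpre]
      rw [if_neg (by simpa [List.isEmpty_iff] using hne)]
      rw [pv_permutations_succ pieces m, List.foldl_flatMap]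
      apply PySem.List.foldl_congr_mem
      intro acc i hi
      have hi' : i < pieces.length := List.mem_range.mp hi
      have hget : pieces[i]? = some pieces[i] := List.getElem?_eq_getElem hi'
      rw [hget]
      simp only [List.foldl_map]
      have hlen' : (pieces.eraseIdx i).length = m := by
        rw [List.length_eraseIdx_of_lt hi']
        omega
      rw [ih (pieces.eraseIdx i) hlen' (pre ++ pieces[i]) acc]
      apply PySem.List.foldl_congr_mem
      intro acc2 p _
      simp only [pv_join_cons, String.append_assoc]

-- ===== VERDICT (by name: the statement is the Claim_ definition above) =====
theorem find_valid_words_spec : Claim_equal_find_valid_words := by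
  intro combos dictionary _
  unfold Spec_find_valid_words find_valid_words find_valid_words_alt
  apply PySem.List.foldl_congr_mem
  intro acc combo _
  rw [pv_dfs_eq dictionary combo.length combo rfl "" acc]
  apply PySem.List.foldl_congr_mem
  intro acc2 perm _
  simp only [String.empty_append]
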